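-- pv_equiv track=rewrite | github.com/jebreimo/Argen | Argen/properties.py | minmaxCount
-- ===== SOURCE A (Python) =====
-- def minmaxCount(counts):
--     counts = list(counts)
--     if not counts:
--         return 0, 0
--     ma = 0
--     for c in counts:
--         if c[1] == -1:
--             ma = -1
--         elif ma != -1:
--             ma = max(c[1], ma)
--     return min(c[0] for c in counts), ma
-- ===== SOURCE B (Python) =====
-- def minmaxCount(counts):
--     counts = list(counts)
--     if not counts:
--         return 0, 0
--     seconds = [c[1] for c in counts]
--     ma = -1 if -1 in seconds else max(seconds + [0])
--     return min(c[0] for c in counts), ma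
-- ===== Notes on version B (the rewrite author's own statement) =====
-- stated objective: simpler
-- what changed: Replaces A's single stateful loop that threads a running max and 'poisons' it on -1 with a two-phase detect-then-reduce: build the seconds once, return -1 if -1 occurs, else max(seconds+[0]); same linear cost.
import Mathlib
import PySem

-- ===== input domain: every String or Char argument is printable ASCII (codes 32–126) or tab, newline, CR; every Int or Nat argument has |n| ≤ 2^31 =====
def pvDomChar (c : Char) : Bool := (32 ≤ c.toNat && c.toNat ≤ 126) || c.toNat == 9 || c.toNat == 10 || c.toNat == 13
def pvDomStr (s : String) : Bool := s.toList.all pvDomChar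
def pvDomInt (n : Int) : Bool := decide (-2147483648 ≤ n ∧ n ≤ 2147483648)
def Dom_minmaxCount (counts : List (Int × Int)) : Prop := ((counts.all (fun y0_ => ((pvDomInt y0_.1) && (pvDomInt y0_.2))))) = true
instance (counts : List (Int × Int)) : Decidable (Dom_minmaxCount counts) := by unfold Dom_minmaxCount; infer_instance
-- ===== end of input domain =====

-- B replaces A's single stateful loop (running max, poisoned on -1) with a two-phase
-- detect-then-reduce (membership test, then a plain max); objective: simpler.

-- ===== PORT A =====
-- Python min over a nonempty sequence: first element, then fold with min.
def pvMinNE (x : Int) (xs : List Int) : Int := xs.foldl min x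

def minmaxCount (counts : List (Int × Int)) : Int × Int :=
  match counts with
  | [] => (0, 0)
  | x :: xs =>
    let ma := (x :: xs).foldl
      (fun ma c => if c.2 = -1 then -1 else if ma ≠ -1 then max c.2 ma else ma) 0
    (pvMinNE x.1 (xs.map Prod.fst), ma)

-- ===== PORT B =====
-- Python max over a nonempty list: first element, then fold with max.
def pvMaxNE (x : Int) (xs : List Int) : Int := xs.foldl max x

def minmaxCount_alt (counts : List (Int × Int)) : Int × Int :=
  match counts with
  | [] => (0, 0)
  | x :: xs =>
    let seconds := (x :: xs).map Prod.snd
    let ma := if (-1 : Int) ∈ seconds then -1 else pvMaxNE x.2 ((xs.map Prod.snd) ++ [0])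
    (pvMinNE x.1 (xs.map Prod.fst), ma)

-- ===== PRECONDITION & SPEC =====
def Spec_minmaxCount (counts : List (Int × Int)) (out : Int × Int) : Prop := out = minmaxCount_alt counts
instance (counts : List (Int × Int)) (out : Int × Int) : Decidable (Spec_minmaxCount counts out) := by unfold Spec_minmaxCount; infer_instance

-- ===== CLAIM (what is proved, stated in full; the proofs are below) =====
def Claim_equal_minmaxCount : Prop := ∀ (counts : List (Int × Int)), Dom_minmaxCount counts → Spec_minmaxCount counts (minmaxCount counts)

-- ===== LEMMAS AND PROOFS =====

-- once poisoned, A's running max stays -1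
theorem pv_foldl_neg_one (l : List (Int × Int)) :
    l.foldl (fun ma c => if c.2 = -1 then -1 else if ma ≠ -1 then max c.2 ma else ma) (-1) = -1 := by
  induction l with
  | nil => rfl
  | cons c l ih =>
    simp only [List.foldl_cons]
    have h : (if c.2 = -1 then (-1 : Int) else if (-1 : Int) ≠ -1 then max c.2 (-1) else -1) = -1 := by
      split_ifs with h1 h2 <;> first | rfl | exact absurd rfl h2
    rw [h]; exact ih

-- A's stateful fold, started unpoisoned, equals detect-then-reduce
theorem pv_foldl_char (l : List (Int × Int)) (ma : Int) (h : ma ≠ -1) :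
    l.foldl (fun ma c => if c.2 = -1 then -1 else if ma ≠ -1 then max c.2 ma else ma) ma
      = if (-1 : Int) ∈ l.map Prod.snd then -1 else l.foldl (fun a c => max c.2 a) ma := by
  induction l generalizing ma with
  | nil => simp
  | cons c l ih =>
    simp only [List.foldl_cons, List.map_cons, List.mem_cons]
    by_cases hc : c.2 = -1
    · have hstep : (if c.2 = -1 then (-1 : Int) else if ma ≠ -1 then max c.2 ma else ma) = -1 := if_pos hc
      rw [hstep, pv_foldl_neg_one, if_pos (Or.inl hc.symm)]
    · have hstep : (if c.2 = -1 then (-1 : Int) else if ma ≠ -1 then max c.2 ma else ma) = max c.2 ma := by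
        rw [if_neg hc, if_pos h]
      have hm : max c.2 ma ≠ -1 := by
        rcases max_choice c.2 ma with h1 | h1 <;> rw [h1] <;> assumption
      rw [hstep, ih _ hm]
      by_cases hmem : (-1 : Int) ∈ l.map Prod.snd
      · rw [if_pos hmem, if_pos (Or.inr hmem)]
      · rw [if_neg hmem, if_neg (by rintro (h1 | h1); exact hc h1.symm; exact hmem h1)]

-- the stateful fold with snd projection is a fold of max over the seconds
theorem pv_foldl_max_map (l : List (Int × Int)) (a : Int) :
    l.foldl (fun a c => max c.2 a) a = (l.map Prod.snd).foldl max a := by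
  induction l generalizing a with
  | nil => rfl
  | cons c l ih => simp only [List.foldl_cons, List.map_cons]; rw [ih, max_comm]

-- pull the second start value out of a max fold
theorem pv_foldl_max_swap (l : List Int) (a b : Int) :
    l.foldl max (max a b) = max (l.foldl max a) b := by
  induction l generalizing a with
  | nil => rfl
  | cons y l ih =>
    simp only [List.foldl_cons]
    rw [show max (max a b) y = max (max a y) b by
          rw [max_assoc, max_comm b y, ← max_assoc], ih]

-- ===== VERDICT (by name: the statement is the Claim_ definition above) =====
theorem minmaxCount_spec : Claim_equal_minmaxCount := by
  intro counts _
  unfold Spec_minmaxCount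
  match counts with
  | [] => rfl
  | x :: xs =>
    simp only [minmaxCount, minmaxCount_alt]
    congr 1
    rw [pv_foldl_char _ _ (by decide)]
    by_cases hmem : (-1 : Int) ∈ (x :: xs).map Prod.snd
    · rw [if_pos hmem, if_pos hmem]
    · rw [if_neg hmem, if_neg hmem]
      have lhs : (x :: xs).foldl (fun a c => max c.2 a) 0
          = max ((xs.map Prod.snd).foldl max x.2) 0 := by
        simp only [List.foldl_cons]
        rw [pv_foldl_max_map]
        exact pv_foldl_max_swap _ _ _
      rw [lhs]
      simp only [pvMaxNE, List.foldl_append, List.foldl_cons, List.foldl_nil]
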